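-- pv_equiv track=rewrite | github.com/wuchx101876/scLongReadPreprocessor | scLongReadPreprocessor/extract_barcode.py | auto_trim_poly_tail
-- ===== SOURCE A (Python) =====
-- def auto_trim_poly_tail(seq, qual, min_len=6):
--     """
--     自动检测并剪切末端polyT或polyA连续区，长度≥min_len
--     """
--     for base in ['T', 'A']:
--         tail_len = 0
--         for b in reversed(seq):
--             if b == base:
--                 tail_len += 1
--             else:
--                 break
--         if tail_len >= min_len:
--             return seq[:-tail_len], qual[:-tail_len]
--     return seq, qual
-- ===== SOURCE B (Python) =====
-- def auto_trim_poly_tail(seq, qual, min_len=6):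
--     """
--     Trim trailing polyT/polyA run of length >= min_len.
--     Single FORWARD pass with a run-length accumulator: after the loop,
--     `tail` is the length of the last homopolymer run of seq.
--     """
--     tail = 0
--     prev = None
--     for c in seq:
--         tail = tail + 1 if c == prev else 1
--         prev = c
--     if seq and seq[-1] in 'TA' and tail >= min_len:
--         return seq[:-tail], qual[:-tail]
--     return seq, qual
-- ===== Notes on version B (the rewrite author's own statement) =====
-- stated objective: alternative
-- what changed: Replaces A's two reversed early-break scans (one per candidate base) by a single forward pass maintaining a run-length accumulator whose final value is the length of the last homopolymer run, then one trim decision; Pre_ restricts to the natural domain min_len >= 1.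
-- outside the precondition, e.g. on auto_trim_poly_tail('G', 'h', 0): A returns ('', ''), B returns ('G', 'h')
import Mathlib
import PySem

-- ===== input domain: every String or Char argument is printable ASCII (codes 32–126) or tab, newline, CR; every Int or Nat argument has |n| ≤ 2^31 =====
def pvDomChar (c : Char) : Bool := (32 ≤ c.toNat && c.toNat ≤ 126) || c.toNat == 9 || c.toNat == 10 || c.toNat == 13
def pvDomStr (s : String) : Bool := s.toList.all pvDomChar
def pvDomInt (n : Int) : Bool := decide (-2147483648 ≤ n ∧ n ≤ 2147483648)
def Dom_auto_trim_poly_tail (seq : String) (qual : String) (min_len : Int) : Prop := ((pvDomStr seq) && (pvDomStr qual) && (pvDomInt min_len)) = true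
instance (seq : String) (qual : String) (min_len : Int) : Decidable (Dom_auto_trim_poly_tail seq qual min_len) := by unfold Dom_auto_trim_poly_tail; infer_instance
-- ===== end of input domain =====

-- B replaces A's two reversed early-break scans by one forward pass with a run-length accumulator (alternative decomposition); Pre_ restricts to positive min_len, the trimmer's natural domain.


-- ===== PORT A =====
-- A's inner loop 'for b in reversed(seq): if b == base: tail_len += 1 else: break'
-- as structural recursion over the reversed character list
def pvTailRun (base : Char) : List Char → Nat
  | [] => 0
  | b :: rest => if b == base then pvTailRun base rest + 1 else 0

-- A: the loop 'for base in ['T','A']' unrolled; seq[:-tail_len] / qual[:-tail_len] via PySem.Str.slice (exact, incl. tail_len = 0 giving "")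
def auto_trim_poly_tail (seq : String) (qual : String) (min_len : Int) : String × String :=
  let tT := pvTailRun 'T' seq.toList.reverse
  if min_len ≤ (tT : Int) then
    (PySem.Str.slice seq none (some (-(tT : Int))), PySem.Str.slice qual none (some (-(tT : Int))))
  else
    let tA := pvTailRun 'A' seq.toList.reverse
    if min_len ≤ (tA : Int) then
      (PySem.Str.slice seq none (some (-(tA : Int))), PySem.Str.slice qual none (some (-(tA : Int))))
    else (seq, qual)

-- ===== PORT B =====
-- B's loop body 'tail = tail + 1 if c == prev else 1; prev = c' as a fold step over (tail, prev)
def pvRunStep (st : Nat × Option Char) (c : Char) : Nat × Option Char :=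
  (if some c == st.2 then st.1 + 1 else 1, some c)

-- B: one forward fold, then 'if seq and seq[-1] in 'TA' and tail >= min_len'
def auto_trim_poly_tail_alt (seq : String) (qual : String) (min_len : Int) : String × String :=
  let st := seq.toList.foldl pvRunStep (0, none)
  if (!seq.toList.isEmpty)
      && (match PySem.Str.pyGet? seq (-1) with
          | some c => c == 'T' || c == 'A'
          | none => false)
      && decide (min_len ≤ (st.1 : Int)) then
    (PySem.Str.slice seq none (some (-(st.1 : Int))), PySem.Str.slice qual none (some (-(st.1 : Int))))
  else (seq, qual)

-- ===== PRECONDITION & SPEC =====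
-- Pre_ restricts to positive min_len, the natural domain of a run-length threshold
-- (min_len ≤ 0 makes every run, even an empty one, qualify for trimming: there A's
-- seq[:-0] slice empties the read whenever it does not end in 'T', while B leaves it unchanged).
def Pre_auto_trim_poly_tail (seq : String) (qual : String) (min_len : Int) : Prop := 1 ≤ min_len
instance (seq : String) (qual : String) (min_len : Int) : Decidable (Pre_auto_trim_poly_tail seq qual min_len) := by unfold Pre_auto_trim_poly_tail; infer_instance

def pvWitness_auto_trim_poly_tail : String × String × Int := ("CTTTT", "qqqqq", 3)

def Spec_auto_trim_poly_tail (seq : String) (qual : String) (min_len : Int) (out : String × String) : Prop := out = auto_trim_poly_tail_alt seq qual min_len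
instance (seq : String) (qual : String) (min_len : Int) (out : String × String) : Decidable (Spec_auto_trim_poly_tail seq qual min_len out) := by unfold Spec_auto_trim_poly_tail; infer_instance

-- ===== CLAIM (what is proved, stated in full; the proofs are below) =====
def Claim_equal_auto_trim_poly_tail : Prop := ∀ (seq : String) (qual : String) (min_len : Int), Dom_auto_trim_poly_tail seq qual min_len → Pre_auto_trim_poly_tail seq qual min_len → Spec_auto_trim_poly_tail seq qual min_len (auto_trim_poly_tail seq qual min_len)

-- ===== LEMMAS AND PROOFS =====
theorem pvTailRun_cons_ne (base b : Char) (rest : List Char) (h : ¬ b = base) :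
    pvTailRun base (b :: rest) = 0 := by simp [pvTailRun, h]

theorem pvTailRun_cons_pos (base : Char) (rest : List Char) :
    1 ≤ pvTailRun base (base :: rest) := by simp [pvTailRun]

-- B's forward fold computes exactly the length of the last run of the last character
theorem runFold_eq (l : List Char) :
    l.foldl pvRunStep (0, none) =
      (match l.reverse with
       | [] => ((0 : Nat), (none : Option Char))
       | c :: rest => (pvTailRun c (c :: rest), some c)) := by
  induction l using List.reverseRecOn with
  | nil => rfl
  | append_singleton l c ih =>
    rw [List.foldl_append, ih, List.reverse_append]
    rcases hr : l.reverse with _ | ⟨d, rest⟩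
    · simp [pvRunStep, pvTailRun]
    · by_cases hcd : c = d
      · subst hcd
        simp [pvRunStep, pvTailRun]
      · have h0 : pvTailRun c (d :: rest) = 0 := pvTailRun_cons_ne _ _ _ (fun h => hcd h.symm)
        simp [pvRunStep, pvTailRun, hcd, h0, Ne.symm hcd]

-- ===== VERDICT (by name: the statement is the Claim_ definition above) =====
theorem auto_trim_poly_tail_spec : Claim_equal_auto_trim_poly_tail := by
  intro seq qual min_len _ hm
  unfold Pre_auto_trim_poly_tail at hm
  unfold Spec_auto_trim_poly_tail auto_trim_poly_tail auto_trim_poly_tail_alt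
  rw [runFold_eq]
  rcases hrev : seq.toList.reverse with _ | ⟨base, rest⟩
  · have hnil : seq.toList = [] := by
      have := congrArg List.reverse hrev; simpa using this
    simp only [pvTailRun, Nat.cast_zero, hnil, List.isEmpty_nil, Bool.not_true,
      Bool.false_and]
    rw [if_neg (by omega), if_neg (by omega), if_neg (by simp)]
  · have hne : seq.toList ≠ [] := by
      intro h; rw [h] at hrev; simp at hrev
    have hlast : PySem.Str.pyGet? seq (-1) = some base := by
      rw [show PySem.Str.pyGet? seq (-1) = PySem.List.pyGet? seq.toList (-1) by
        simp [PySem.Str.pyGet?]]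
      rw [PySem.List.pyGet?_neg_one]
      rw [← List.head?_reverse, hrev]; rfl
    have hemp : seq.toList.isEmpty = false := by
      simp [hne]
    simp only [hlast, hemp, Bool.not_false, Bool.true_and]
    by_cases hT : base = 'T'
    · subst hT
      have hA : pvTailRun 'A' ('T' :: rest) = 0 := pvTailRun_cons_ne _ _ _ (by decide)
      have h1 := pvTailRun_cons_pos 'T' rest
      simp only [hA, Nat.cast_zero, show (('T' == 'T' || 'T' == 'A') = true) by decide,
        Bool.true_and]
      split_ifs <;> first | rfl | omega | simp_all <;> omega
    · have hTrun : pvTailRun 'T' (base :: rest) = 0 := pvTailRun_cons_ne _ _ _ hT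
      by_cases hAb : base = 'A'
      · subst hAb
        have h1 := pvTailRun_cons_pos 'A' rest
        simp only [hTrun, Nat.cast_zero, show (('A' == 'T' || 'A' == 'A') = true) by decide,
          Bool.true_and]
        split_ifs <;> first | rfl | omega | simp_all <;> omega
      · have hArun : pvTailRun 'A' (base :: rest) = 0 := pvTailRun_cons_ne _ _ _ hAb
        have hg : (base == 'T' || base == 'A') = false := by simp [hT, hAb]
        simp only [hTrun, hArun, Nat.cast_zero, hg, Bool.false_and]
        rw [if_neg (by omega), if_neg (by omega), if_neg (by simp)]
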